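-- pv_equiv track=rewrite | github.com/scmacdon/WeatherPython | src/weathertools/aws/test_platform/GO/run_tests.py | extract_failures
-- ===== SOURCE A (Python) =====
-- def extract_failures(output, service_name):
--     """Extract failed test details from go test output in required JSON shape."""
--     failures = []
--     lines = output.splitlines()
--     current = []
--     in_failure = False
--
--     for line in lines:
--         if line.startswith("--- FAIL:"):
--             in_failure = True
--         if in_failure:
--             current.append(line)
--             if line.startswith("FAIL") or line.strip() == "":
--                 failures.append({
--                     "service": service_name,
--                     "test_name": "FAIL",
--                     "status": "failed",
--                     "message": "\n".join(current).strip()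
--                 })
--                 current = []
--                 in_failure = False
--
--     if current:
--         failures.append({
--             "service": service_name,
--             "test_name": "FAIL",
--             "status": "failed",
--             "message": "\n".join(current).strip()
--         })
--
--     return failures
-- ===== SOURCE B (Python) =====
-- def extract_failures(output, service_name):
--     """Extract failed test details from go test output in required JSON shape."""
--     lines = output.splitlines()
--     n = len(lines)
--
--     # Phase 1: collect the failure blocks (each a list of lines) by searching
--     # for a "--- FAIL:" start line and consuming up to and including the
--     # terminating "FAIL"-prefixed or blank line (or to end of input).
--     blocks = []
--     i = 0
--     while i < n:
--         if lines[i].startswith("--- FAIL:"):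
--             block = []
--             j = i
--             while j < n:
--                 block.append(lines[j])
--                 j += 1
--                 if block[-1].startswith("FAIL") or block[-1].strip() == "":
--                     break
--             blocks.append(block)
--             i = j
--         else:
--             i += 1
--
--     # Phase 2: map each block to its record.
--     return [
--         {
--             "service": service_name,
--             "test_name": "FAIL",
--             "status": "failed",
--             "message": "\n".join(block).strip(),
--         }
--         for block in blocks
--     ]
-- ===== Notes on version B (the rewrite author's own statement) =====
-- stated objective: alternative
-- what changed: Two-phase search-based segmentation: an outer scan jumps between '--- FAIL:' start lines and an inner scan consumes each block through its terminator, then a comprehension maps blocks to records, replacing A's single-pass boolean state machine that emits records inline.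
import Mathlib
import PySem

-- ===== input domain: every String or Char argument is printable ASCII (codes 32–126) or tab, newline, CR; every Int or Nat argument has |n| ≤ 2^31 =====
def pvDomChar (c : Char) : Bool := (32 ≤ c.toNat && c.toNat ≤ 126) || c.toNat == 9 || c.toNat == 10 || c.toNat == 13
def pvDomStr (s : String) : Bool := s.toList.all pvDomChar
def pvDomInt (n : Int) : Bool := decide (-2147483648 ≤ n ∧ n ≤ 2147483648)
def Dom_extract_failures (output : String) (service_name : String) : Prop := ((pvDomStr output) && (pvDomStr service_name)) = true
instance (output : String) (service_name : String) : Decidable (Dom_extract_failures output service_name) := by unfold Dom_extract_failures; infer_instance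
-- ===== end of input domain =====

-- B replaces A's single-pass boolean state machine by a two-phase search: collect failure blocks, then map them to records; alternative decomposition, same cost.

-- ===== PORT A =====
-- the record dict literal (association list in insertion order)
def pvRec (service_name : String) (msg : String) : List (String × String) :=
  [("service", service_name), ("test_name", "FAIL"), ("status", "failed"), ("message", msg)]

-- A's loop body: state = (failures, current, in_failure)
def pvStepA (service_name : String)
    (st : List (List (String × String)) × List String × Bool) (line : String) :
    List (List (String × String)) × List String × Bool :=
  let in_failure := if PySem.Str.startswith line "--- FAIL:" then true else st.2.2
  if in_failure then
    let current := st.2.1 ++ [line]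
    if PySem.Str.startswith line "FAIL" || PySem.Str.strip line == "" then
      (st.1 ++ [pvRec service_name (PySem.Str.strip (PySem.Str.join "\n" current))], ([] : List String), false)
    else
      (st.1, current, true)
  else
    (st.1, st.2.1, st.2.2)

def extract_failures (output : String) (service_name : String) : List (List (String × String)) :=
  let lines := PySem.Str.splitlines output
  let st := lines.foldl (pvStepA service_name) ([], [], false)
  if st.2.1.isEmpty then st.1
  else st.1 ++ [pvRec service_name (PySem.Str.strip (PySem.Str.join "\n" st.2.1))]

-- ===== PORT B =====
-- inner scan of Source B: consume lines through the terminator (inclusive); returns (block, rest)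
def pvTakeB : List String → List String × List String
  | [] => ([], [])
  | l :: rest =>
    if PySem.Str.startswith l "FAIL" || PySem.Str.strip l == "" then ([l], rest)
    else
      let p := pvTakeB rest
      (l :: p.1, p.2)

theorem pvTakeB_rest_length : ∀ ls : List String, (pvTakeB ls).2.length ≤ ls.length - 1
  | [] => by simp [pvTakeB]
  | l :: rest => by
    simp only [pvTakeB]
    split
    · simp
    · have := pvTakeB_rest_length rest
      simp only [List.length_cons]
      omega

-- outer scan of Source B: phase 1, the list of failure blocks
def pvBlocksB : List String → List (List String)
  | [] => []
  | l :: rest =>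
    if PySem.Str.startswith l "--- FAIL:" then
      let p := pvTakeB (l :: rest)
      p.1 :: pvBlocksB p.2
    else
      pvBlocksB rest
termination_by ls => ls.length
decreasing_by
  · have := pvTakeB_rest_length (l :: rest)
    simp only [List.length_cons] at *
    omega
  · simp

def extract_failures_alt (output : String) (service_name : String) : List (List (String × String)) :=
  (pvBlocksB (PySem.Str.splitlines output)).map
    (fun block => pvRec service_name (PySem.Str.strip (PySem.Str.join "\n" block)))

-- ===== PRECONDITION & SPEC =====
def Spec_extract_failures (output : String) (service_name : String) (out : List (List (String × String))) : Prop := out = extract_failures_alt output service_name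
instance (output : String) (service_name : String) (out : List (List (String × String))) : Decidable (Spec_extract_failures output service_name out) := by unfold Spec_extract_failures; infer_instance

-- ===== CLAIM (what is proved, stated in full; the proofs are below) =====
def Claim_equal_extract_failures : Prop := ∀ (output : String) (service_name : String), Dom_extract_failures output service_name → Spec_extract_failures output service_name (extract_failures output service_name)

-- ===== LEMMAS AND PROOFS =====

-- the tail flush applied to a loop state
def pvFin (sn : String) (st : List (List (String × String)) × List String × Bool) :
    List (List (String × String)) :=
  if st.2.1.isEmpty then st.1
  else st.1 ++ [pvRec sn (PySem.Str.strip (PySem.Str.join "\n" st.2.1))]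

def pvMk (sn : String) (b : List String) : List (String × String) :=
  pvRec sn (PySem.Str.strip (PySem.Str.join "\n" b))

-- combined invariant: outer (not in a failure) and inner (inside a failure block) agreement
theorem pvLoop (sn : String) : ∀ ls : List String,
    (∀ acc, pvFin sn (List.foldl (pvStepA sn) (acc, [], false) ls)
        = acc ++ (pvBlocksB ls).map (pvMk sn)) ∧
    (∀ acc cur, cur ≠ [] →
      pvFin sn (List.foldl (pvStepA sn) (acc, cur, true) ls)
        = acc ++ pvMk sn (cur ++ (pvTakeB ls).1) :: (pvBlocksB (pvTakeB ls).2).map (pvMk sn))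
  | [] => by
    refine ⟨fun acc => by simp [pvFin, pvBlocksB], fun acc cur hcur => ?_⟩
    simp only [List.foldl_nil, pvFin, pvTakeB, pvBlocksB, List.append_nil, List.map_nil]
    simp [List.isEmpty_iff, hcur, pvMk]
  | l :: rest => by
    obtain ⟨ihOut, ihIn⟩ := pvLoop sn rest
    constructor
    · intro acc
      by_cases hs : PySem.Str.startswith l "--- FAIL:" = true
      · by_cases ht : (PySem.Str.startswith l "FAIL" || PySem.Str.strip l == "") = true
        · simp only [List.foldl_cons, pvStepA, pvBlocksB, pvTakeB, hs, ht, if_true,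
            List.nil_append]
          rw [ihOut]
          simp [pvMk]
        · have ht' := eq_false_of_ne_true ht
          simp only [List.foldl_cons, pvStepA, pvBlocksB, pvTakeB, hs, ht', if_true,
            Bool.false_eq_true, if_false, List.nil_append]
          rw [ihIn _ [l] (by simp)]
          simp [pvMk]
      · have hs' := eq_false_of_ne_true hs
        simp only [List.foldl_cons, pvStepA, pvBlocksB, hs', Bool.false_eq_true, if_false]
        exact ihOut acc
    · intro acc cur hcur
      have hin : (if PySem.Str.startswith l "--- FAIL:" = true then true else true) = true :=
        ite_self true
      by_cases ht : (PySem.Str.startswith l "FAIL" || PySem.Str.strip l == "") = true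
      · simp only [List.foldl_cons, pvStepA, pvTakeB, hin, ht, if_true]
        rw [ihOut]
        simp [pvMk]
      · have ht' := eq_false_of_ne_true ht
        simp only [List.foldl_cons, pvStepA, pvTakeB, hin, ht', if_true,
          Bool.false_eq_true, if_false]
        rw [ihIn _ (cur ++ [l]) (by simp)]
        simp [pvMk]

-- ===== VERDICT (by name: the statement is the Claim_ definition above) =====
theorem extract_failures_spec : Claim_equal_extract_failures := by
  intro output service_name _
  unfold Spec_extract_failures extract_failures extract_failures_alt
  have h := (pvLoop service_name (PySem.Str.splitlines output)).1 []
  simpa [pvFin, pvMk] using h
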